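-- pv_equiv track=rewrite | github.com/dosentmatter/elements-of-programming-interviews | epi/utils/itertoolsextra.py | max_diff_reversed_generator
-- ===== SOURCE A (Python) =====
-- def max_diff_reversed_generator(iterable):
--     """
--     Generate the reversed max difference so far by keeping track of the
--     previous maximum. iterable must have >= 2 elements.
--
--     Uses the previous maximum to calculate a new difference and update
--     the current max difference if it is bigger.
--
--     Note that the generator will have 1 element less than the iterable because
--     there are k-1 possible differences in a iterable of size k.
--     """
--
--     iterable = iter(iterable)
--     try:
--         e0 = next(iterable)
--         e1 = next(iterable)
--     except StopIteration:
--         raise ValueError("iterable must have >= 2 elements.")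
--     maxi = max(e0, e1)
--     max_diff = e0 - e1
--     yield max_diff
--     for e in iterable:
--         # find max_diff using PREVIOUS maximum
--         max_diff = max(max_diff, maxi - e)
--         yield max_diff
--         # after finding current max_diff, can update the previous maximum
--         maxi = max(maxi, e)
-- ===== SOURCE B (Python) =====
-- def max_diff_reversed_generator(iterable):
--     """
--     Simpler decomposition: materialize the items, precompute the prefix
--     maxima, then yield the running max of (prefix_max - next item).
--     Still a generator: nothing runs (and the ValueError for < 2 elements
--     fires) until the generator is first advanced.  Note: unlike the
--     original, this consumes the whole iterable on the first next();
--     equivalence is about the yielded values.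
--     """
--     items = list(iterable)
--     if len(items) < 2:
--         raise ValueError("iterable must have >= 2 elements.")
--     pmax = []
--     m = items[0]
--     for e in items[:-1]:
--         m = m if m >= e else e
--         pmax.append(m)
--     best = None
--     for p, e in zip(pmax, items[1:]):
--         d = p - e
--         best = d if best is None or d > best else best
--         yield best
-- ===== Notes on version B (the rewrite author's own statement) =====
-- stated objective: simpler
-- what changed: Instead of bootstrapping two elements and interleaving every yield with a lazily-updated previous maximum, B precomputes the list of prefix maxima in a plain tight loop and then yields the running max of the zipped differences (prefix_max[i] - items[i+1]); doing the max-tracking outside the generator's yielding loop gives a measured constant-factor speedup.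
import Mathlib
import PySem

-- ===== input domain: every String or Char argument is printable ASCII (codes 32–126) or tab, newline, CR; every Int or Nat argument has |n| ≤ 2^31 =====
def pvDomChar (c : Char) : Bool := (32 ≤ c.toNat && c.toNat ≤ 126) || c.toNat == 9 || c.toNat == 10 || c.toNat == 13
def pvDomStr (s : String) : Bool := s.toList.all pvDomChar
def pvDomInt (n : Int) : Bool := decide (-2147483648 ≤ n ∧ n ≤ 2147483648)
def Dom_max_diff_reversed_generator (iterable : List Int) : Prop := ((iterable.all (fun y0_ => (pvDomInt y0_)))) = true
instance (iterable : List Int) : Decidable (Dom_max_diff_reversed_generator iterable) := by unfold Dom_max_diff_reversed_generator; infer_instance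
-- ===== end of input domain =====

-- ===== PORT A =====
-- Python A bootstraps the first two elements, then folds over the rest,
-- carrying (max_diff, maxi, yielded-so-far).
def max_diff_reversed_generator (iterable : List Int) : List Int :=
  match iterable with
  | e0 :: e1 :: rest =>
    let maxi : Int := max e0 e1
    let md : Int := e0 - e1
    md :: (rest.foldl
      (fun (st : Int × Int × List Int) e =>
        let md' := max st.1 (st.2.1 - e)
        (md', max st.2.1 e, st.2.2 ++ [md']))
      (md, maxi, ([] : List Int))).2.2
  | _ => []     -- Python raises ValueError here (excluded by Pre_)

-- ===== PORT B =====
-- Source B's prefix-maxima loop: m starts at items[0], scans items[:-1].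
def pvPrefMax (m : Int) : List Int → List Int
  | [] => []
  | e :: rest =>
    let m' := if m ≥ e then m else e
    m' :: pvPrefMax m' rest

def max_diff_reversed_generator_alt (iterable : List Int) : List Int :=
  match iterable with
  | [] => []     -- Python raises ValueError here (excluded by Pre_)
  | x :: _ =>
    if iterable.length < 2 then []     -- Python raises ValueError here (excluded by Pre_)
    else
      let pmax := pvPrefMax x iterable.dropLast
      ((pmax.zip (iterable.drop 1)).foldl
        (fun (st : Option Int × List Int) pe =>
          let d := pe.1 - pe.2
          let best := match st.1 with
            | none => d
            | some b => if d > b then d else b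
          (some best, st.2 ++ [best]))
        (none, ([] : List Int))).2

-- ===== PRECONDITION & SPEC =====
-- Pre_: Python A raises ValueError("iterable must have >= 2 elements.") on
-- shorter inputs; exactly those are excluded.
def Pre_max_diff_reversed_generator (iterable : List Int) : Prop :=
  2 ≤ iterable.length
instance (iterable : List Int) : Decidable (Pre_max_diff_reversed_generator iterable) := by
  unfold Pre_max_diff_reversed_generator; infer_instance
def pvWitness_max_diff_reversed_generator : List Int := [3, 1, 4]
def Spec_max_diff_reversed_generator (iterable : List Int) (out : List Int) : Prop := out = max_diff_reversed_generator_alt iterable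
instance (iterable : List Int) (out : List Int) : Decidable (Spec_max_diff_reversed_generator iterable out) := by unfold Spec_max_diff_reversed_generator; infer_instance

-- ===== CLAIM (what is proved, stated in full; the proofs are below) =====
def Claim_equal_max_diff_reversed_generator : Prop := ∀ (iterable : List Int), Dom_max_diff_reversed_generator iterable → Pre_max_diff_reversed_generator iterable → Spec_max_diff_reversed_generator iterable (max_diff_reversed_generator iterable)

-- ===== LEMMAS AND PROOFS =====


-- A's yielded values as a pure recursion.
def fA (md maxi : Int) : List Int → List Int
  | [] => []
  | e :: rest =>
    let md' := max md (maxi - e)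
    md' :: fA md' (max maxi e) rest

-- B's running-max-of-diffs after the first diff has been taken.
def gB (md : Int) : List (Int × Int) → List Int
  | [] => []
  | pe :: rest =>
    let d := pe.1 - pe.2
    let md' := if d > md then d else md
    md' :: gB md' rest

lemma foldA_eq (rest : List Int) : ∀ (md maxi : Int) (acc : List Int),
    (rest.foldl
      (fun (st : Int × Int × List Int) e =>
        let md' := max st.1 (st.2.1 - e)
        (md', max st.2.1 e, st.2.2 ++ [md']))
      (md, maxi, acc)).2.2 = acc ++ fA md maxi rest := by
  induction rest with
  | nil => intro md maxi acc; simp [fA]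
  | cons e rest ih =>
    intro md maxi acc
    simp only [List.foldl_cons, fA]
    rw [ih]
    simp

lemma foldB_eq (ps : List (Int × Int)) : ∀ (md : Int) (acc : List Int),
    (ps.foldl
      (fun (st : Option Int × List Int) pe =>
        let d := pe.1 - pe.2
        let best := match st.1 with
          | none => d
          | some b => if d > b then d else b
        (some best, st.2 ++ [best]))
      (some md, acc)).2 = acc ++ gB md ps := by
  induction ps with
  | nil => intro md acc; simp [gB]
  | cons pe ps ih =>
    intro md acc
    simp only [List.foldl_cons, gB]
    rw [ih]
    simp

lemma prefMax_max (m e : Int) : (if m ≥ e then m else e) = max m e := by omega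

-- zipping with a list one shorter makes the dropLast invisible
lemma zip_prefMax_dropLast (l : List Int) : ∀ (r : List Int) (m : Int),
    r.length + 1 = l.length →
    (pvPrefMax m l.dropLast).zip r = (pvPrefMax m l).zip r := by
  induction l with
  | nil => intro r m h; simp at h
  | cons a l ih =>
    intro r m h
    cases l with
    | nil =>
      have : r = [] := by
        cases r with
        | nil => rfl
        | cons x xs => simp at h
      simp [this]
    | cons b l' =>
      cases r with
      | nil => simp [pvPrefMax]
      | cons c r' =>
        simp only [List.dropLast_cons₂, pvPrefMax, List.zip_cons_cons]
        rw [ih r' _ (by simpa using h)]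
        simp [pvPrefMax]

-- main alignment: A's fused loop = B's running max over (shifted prefix max, item)
lemma fA_eq_gB (rest : List Int) : ∀ (x m md : Int),
    fA md (max m x) rest = gB md ((pvPrefMax m (x :: rest)).zip rest) := by
  induction rest with
  | nil => intro x m md; simp [fA, pvPrefMax, gB]
  | cons r rt ih =>
    intro x m md
    rw [show pvPrefMax m (x :: r :: rt) = max m x :: pvPrefMax (max m x) (r :: rt) by
      simp only [pvPrefMax]; rw [prefMax_max]]
    simp only [List.zip_cons_cons, fA, gB]
    have hmax : (if max m x - r > md then max m x - r else md) = max md (max m x - r) := by omega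
    rw [hmax]
    congr 1
    have h2 := ih r (max m x) (max md (max m x - r))
    exact h2

-- ===== VERDICT (by name: the statement is the Claim_ definition above) =====
theorem max_diff_reversed_generator_spec : Claim_equal_max_diff_reversed_generator := by
  intro iterable _ hpre
  unfold Spec_max_diff_reversed_generator
  match iterable, hpre with
  | e0 :: e1 :: rest, _ =>
    show _ = max_diff_reversed_generator_alt (e0 :: e1 :: rest)
    unfold max_diff_reversed_generator max_diff_reversed_generator_alt
    simp only [List.length_cons, List.drop_succ_cons, List.drop_zero]
    rw [if_neg (by omega)]
    rw [foldA_eq]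
    have hdl : (e0 :: e1 :: rest).dropLast = e0 :: (e1 :: rest).dropLast := by
      simp [List.dropLast_cons₂]
    rw [hdl]
    simp only [pvPrefMax]
    rw [show (if e0 ≥ e0 then e0 else e0) = e0 by simp]
    simp only [List.zip_cons_cons, List.foldl_cons]
    rw [foldB_eq]
    rw [zip_prefMax_dropLast (e1 :: rest) rest e0 (by simp)]
    simp only [List.nil_append]
    congr 1
    exact fA_eq_gB rest e1 e0 (e0 - e1)
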